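-- pv_equiv track=rewrite | github.com/rao305/clitest1 | my_cli_bot/personalized_graduation_planner.py | _calculate_gen_ed_remaining
-- ===== SOURCE A (Python) =====
-- from typing import Dict, List, Tuple, Optional, Set
--
-- def _calculate_gen_ed_remaining(completed_courses: List[str]) -> List[str]:
--     """Calculate remaining general education requirements"""
--     # Simplified - would need more detailed tracking in real implementation
--     gen_ed_categories = [
--         "ENGL 10600",  # Written Communication
--         "COMM 11400",  # Oral Communication
--         "General Ed Science",
--         "General Ed Humanities",
--         "General Ed Social Sciences"
--     ]
--
--     # Filter out what's already completed (simplified check)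
--     remaining = []
--     for req in gen_ed_categories:
--         if not any(req in course for course in completed_courses):
--             remaining.append(req)
--
--     return remaining
-- ===== SOURCE B (Python) =====
-- from typing import List
--
-- def _calculate_gen_ed_remaining(completed_courses: List[str]) -> List[str]:
--     """Calculate remaining general education requirements (shrinking-worklist formulation)."""
--     remaining = [
--         "ENGL 10600",
--         "COMM 11400",
--         "General Ed Science",
--         "General Ed Humanities",
--         "General Ed Social Sciences"
--     ]
--     # Fold over the courses, pruning satisfied categories as we go; order is preserved.
--     for course in completed_courses:
--         remaining = [req for req in remaining if req not in course]
--     return remaining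
-- ===== Notes on version B (the rewrite author's own statement) =====
-- stated objective: simpler
-- what changed: Replaces A's per-category scan over all courses (any-inside-for building an output list) with a fold over the courses that prunes a shrinking worklist of categories; no any(), no output accumulator, the survivors are the answer.
import Mathlib
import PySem

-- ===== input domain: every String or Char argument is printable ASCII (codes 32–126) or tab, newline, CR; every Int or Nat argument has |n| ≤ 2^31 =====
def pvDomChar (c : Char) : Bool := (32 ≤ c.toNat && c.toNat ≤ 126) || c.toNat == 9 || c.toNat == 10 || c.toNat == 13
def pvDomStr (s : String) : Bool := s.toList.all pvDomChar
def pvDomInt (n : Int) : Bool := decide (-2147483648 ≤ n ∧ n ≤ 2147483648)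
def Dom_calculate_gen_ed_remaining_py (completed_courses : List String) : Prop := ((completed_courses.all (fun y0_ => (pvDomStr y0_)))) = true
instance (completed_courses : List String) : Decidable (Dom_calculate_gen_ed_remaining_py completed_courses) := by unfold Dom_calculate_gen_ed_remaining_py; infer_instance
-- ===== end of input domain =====

-- ===== PORT A =====
-- B replaces A's per-category any-scan with a fold over the courses pruning a shrinking
-- worklist of categories (simpler decomposition); same values.
def calculate_gen_ed_remaining_py (completed_courses : List String) : List String :=
  let gen_ed_categories : List String :=
    ["ENGL 10600", "COMM 11400", "General Ed Science",
     "General Ed Humanities", "General Ed Social Sciences"]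
  gen_ed_categories.foldl
    (fun remaining req =>
      if !(completed_courses.any (fun course => PySem.Str.isIn req course)) then
        remaining ++ [req]
      else remaining) []

-- ===== PORT B =====
def calculate_gen_ed_remaining_py_alt (completed_courses : List String) : List String :=
  completed_courses.foldl
    (fun remaining course => remaining.filter (fun req => !(PySem.Str.isIn req course)))
    ["ENGL 10600", "COMM 11400", "General Ed Science",
     "General Ed Humanities", "General Ed Social Sciences"]

-- ===== PRECONDITION & SPEC =====
def Spec_calculate_gen_ed_remaining_py (completed_courses : List String) (out : List String) : Prop := out = calculate_gen_ed_remaining_py_alt completed_courses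
instance (completed_courses : List String) (out : List String) : Decidable (Spec_calculate_gen_ed_remaining_py completed_courses out) := by unfold Spec_calculate_gen_ed_remaining_py; infer_instance

-- ===== CLAIM (what is proved, stated in full; the proofs are below) =====
def Claim_equal_calculate_gen_ed_remaining_py : Prop := ∀ (completed_courses : List String), Dom_calculate_gen_ed_remaining_py completed_courses → Spec_calculate_gen_ed_remaining_py completed_courses (calculate_gen_ed_remaining_py completed_courses)

-- ===== LEMMAS AND PROOFS =====

-- B's shrinking-worklist fold equals one filter by "no course matches".
theorem fold_filter_eq (courses : List String) (cats : List String) :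
    courses.foldl
        (fun remaining course => remaining.filter (fun req => !(PySem.Str.isIn req course)))
        cats
      = cats.filter (fun req => !(courses.any (fun course => PySem.Str.isIn req course))) := by
  induction courses generalizing cats with
  | nil => simp
  | cons c t ih =>
    simp only [List.foldl_cons, ih, List.filter_filter, List.any_cons, Bool.not_or]
    exact List.filter_congr fun x _ => Bool.and_comm _ _

-- ===== VERDICT (by name: the statement is the Claim_ definition above) =====
theorem calculate_gen_ed_remaining_py_spec : Claim_equal_calculate_gen_ed_remaining_py := by
  intro courses _
  unfold Spec_calculate_gen_ed_remaining_py calculate_gen_ed_remaining_py calculate_gen_ed_remaining_py_alt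
  rw [PySem.List.foldl_append_if_eq_filter
        (fun req => !(courses.any (fun course => PySem.Str.isIn req course))),
      List.nil_append, fold_filter_eq]
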